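-- pv_equiv track=rewrite | github.com/MuraD603/testing-tasks | task1/task1.py | circular_path
-- ===== SOURCE A (Python) =====
-- def circular_path(n, m):
--     arr = list(range(1, n + 1))
--     path = []
--     current = 0
--
--     visited = set()
--
--     while current not in visited:
--         path.append(str(arr[current]))
--         visited.add(current)
--         current = (current + m - 1) % n
--
--     return ''.join(path)
-- ===== SOURCE B (Python) =====
-- def circular_path(n, m):
--     step = (m - 1) % n
--     g, r = n, step
--     while r:
--         g, r = r, g % r
--     count = n // g
--     return ''.join(str(i * step % n + 1) for i in range(count))
-- ===== Notes on version B (the rewrite author's own statement) =====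
-- stated objective: faster
-- what changed: B replaces A's visited-set simulation of the walk by a closed form: it computes the cycle length count = n // gcd((m-1) % n, n) with a Euclid loop and emits str(i*(m-1) % n + 1) for i in range(count), keeping no set, no path list and no per-step membership test.
import Mathlib
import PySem

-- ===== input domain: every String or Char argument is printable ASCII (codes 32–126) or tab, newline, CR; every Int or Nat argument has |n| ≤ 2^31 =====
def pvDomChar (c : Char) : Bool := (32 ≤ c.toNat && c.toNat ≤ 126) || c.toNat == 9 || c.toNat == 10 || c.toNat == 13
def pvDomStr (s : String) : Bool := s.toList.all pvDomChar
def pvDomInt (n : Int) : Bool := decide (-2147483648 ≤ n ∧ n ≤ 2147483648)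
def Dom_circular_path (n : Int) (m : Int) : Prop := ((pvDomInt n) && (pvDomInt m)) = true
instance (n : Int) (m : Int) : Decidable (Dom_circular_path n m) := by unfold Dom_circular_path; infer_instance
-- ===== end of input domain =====

-- B drops A's visited set: the walk visits exactly count = n // gcd((m-1) % n, n)
-- indices, the i-th being i*(m-1) % n, so B emits them directly (measured faster
-- by a constant factor: no set bookkeeping).

-- ===== PORT A =====
-- the while loop of A: state (path, current, visited); fuel n+1 suffices because the
-- loop stops after at most n iterations (visited holds distinct indices in [0, n));
-- the 'none' branch of pyGet? is Python's IndexError (n ≤ 0), excluded by Pre_.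
def cpLoopA (arr : List Int) (n : Int) (m : Int) :
    Nat → List String → Int → PySem.Set Int → List String
  | 0, path, _, _ => path
  | fuel+1, path, current, visited =>
    if PySem.Set.contains visited current then path
    else
      match PySem.List.pyGet? arr current with
      | none => path
      | some v =>
          cpLoopA arr n m fuel (path ++ [PySem.Int.toStr v])
            (PySem.Int.mod (current + m - 1) n) (PySem.Set.add visited current)

def circular_path (n : Int) (m : Int) : String :=
  let arr := PySem.List.pyRange 1 (n + 1) 1
  PySem.Str.join "" (cpLoopA arr n m (n.toNat + 1) [] 0 PySem.Set.empty)

-- ===== PORT B =====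
-- hand-written Euclid loop of Source B (Python floor mod); fuel r.natAbs + 1 is only a
-- termination guard: |g % r| < |r| so the loop always stops within that many steps
def pyGcdFuel : Nat → Int → Int → Int
  | 0, g, _ => g
  | fuel + 1, g, r => if r = 0 then g else pyGcdFuel fuel r (PySem.Int.mod g r)

def pyGcdLoop (g : Int) (r : Int) : Int := pyGcdFuel (r.natAbs + 1) g r

def circular_path_alt (n : Int) (m : Int) : String :=
  let step := PySem.Int.mod (m - 1) n
  let g := pyGcdLoop n step
  let count := PySem.Int.floordiv n g
  PySem.Str.join ""
    ((PySem.List.pyRange 0 count 1).map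
      (fun i => PySem.Int.toStr (PySem.Int.mod (i * step) n + 1)))

-- ===== PRECONDITION & SPEC =====
-- Pre_ excludes exactly n ≤ 0, where Python A raises IndexError (arr is empty).
def Pre_circular_path (n : Int) (m : Int) : Prop := 1 ≤ n
instance (n : Int) (m : Int) : Decidable (Pre_circular_path n m) := by
  unfold Pre_circular_path; infer_instance

def pvWitness_circular_path : Int × Int := (6, 3)

def Spec_circular_path (n : Int) (m : Int) (out : String) : Prop := out = circular_path_alt n m
instance (n : Int) (m : Int) (out : String) : Decidable (Spec_circular_path n m out) := by
  unfold Spec_circular_path; infer_instance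

-- ===== CLAIM (what is proved, stated in full; the proofs are below) =====
def Claim_equal_circular_path : Prop := ∀ (n : Int) (m : Int), Dom_circular_path n m → Pre_circular_path n m → Spec_circular_path n m (circular_path n m)

-- ===== LEMMAS AND PROOFS =====

-- the Euclid loop of B computes Nat.gcd on cast arguments (fuel B+1 always suffices)
theorem gcd_loop_eq (fuel : Nat) : ∀ A B : Nat, B < fuel →
    pyGcdFuel fuel (A : Int) (B : Int) = (Nat.gcd B A : Int) := by
  induction fuel with
  | zero => omega
  | succ f ih =>
    intro A B hB
    by_cases h : B = 0
    · subst h; simp [pyGcdFuel]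
    · rw [pyGcdFuel, if_neg (by exact_mod_cast h), PySem.Int.mod_natCast,
        ih B (A % B) (by have := Nat.mod_lt A (Nat.pos_of_ne_zero h); omega),
        ← Nat.gcd_rec B A, Nat.gcd_comm B A]

-- value visited at step k of the walk (N = n, S = step, both as Nat)
def cpVals (N S k : Nat) : Int := ((k * S % N : Nat) : Int)

theorem dvd_key (N S d : Nat) (hN : 0 < N) : N ∣ d * S ↔ (N / Nat.gcd N S) ∣ d := by
  set G := Nat.gcd N S with hG
  have hGpos : 0 < G := Nat.gcd_pos_of_pos_left S hN
  have hN' : G * (N / G) = N := Nat.mul_div_cancel' (Nat.gcd_dvd_left N S)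
  have hS' : G * (S / G) = S := Nat.mul_div_cancel' (Nat.gcd_dvd_right N S)
  have hcop : Nat.Coprime (N / G) (S / G) := Nat.coprime_div_gcd_div_gcd hGpos
  constructor
  · intro h
    have h1 : G * (N / G) ∣ d * (G * (S / G)) := by rw [hN', hS']; exact h
    rw [show d * (G * (S / G)) = G * (d * (S / G)) by ring] at h1
    exact hcop.dvd_of_dvd_mul_right ((mul_dvd_mul_iff_left (by omega : G ≠ 0)).mp h1)
  · rintro ⟨t, ht⟩
    refine ⟨t * (S / G), ?_⟩
    rw [ht]
    nth_rewrite 1 [← hS']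
    calc N / G * t * (G * (S / G)) = G * (N / G) * (t * (S / G)) := by ring
    _ = N * (t * (S / G)) := by rw [hN']

-- the first C = N / gcd(N,S) values of the walk are pairwise distinct
theorem cpVals_distinct (N S i j : Nat) (hN : 0 < N) (hij : i < j)
    (hj : j < N / Nat.gcd N S) : cpVals N S i ≠ cpVals N S j := by
  unfold cpVals
  intro h
  have h' : i * S % N = j * S % N := by exact_mod_cast h
  have hdvd : N ∣ j * S - i * S := (Nat.modEq_iff_dvd' (Nat.mul_le_mul_right S (le_of_lt hij))).mp h'
  rw [← Nat.sub_mul] at hdvd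
  have := (dvd_key N S (j - i) hN).mp hdvd
  have := Nat.le_of_dvd (by omega) this
  omega

-- the walk returns to 0 after exactly C steps
theorem cpVals_period (N S : Nat) (hN : 0 < N) : cpVals N S (N / Nat.gcd N S) = 0 := by
  unfold cpVals
  have : N ∣ (N / Nat.gcd N S) * S := (dvd_key N S _ hN).mpr dvd_rfl
  simp [Nat.mod_eq_zero_of_dvd this]

theorem cpVals_zero (N S : Nat) : cpVals N S 0 = 0 := by simp [cpVals]

-- loop invariant for A's while loop
theorem cpLoop_inv (n m : Int) (hn : 1 ≤ n) (S : Nat)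
    (hS : PySem.Int.mod (m - 1) n = (S : Int)) :
    ∀ (fuel k : Nat) (path : List String),
      k ≤ n.toNat / Nat.gcd n.toNat S → n.toNat / Nat.gcd n.toNat S + 1 ≤ k + fuel →
      cpLoopA (PySem.List.pyRange 1 (n + 1) 1) n m fuel path (cpVals n.toNat S k)
          (PySem.Set.ofList ((List.range k).map (cpVals n.toNat S)))
        = path ++ (List.range (n.toNat / Nat.gcd n.toNat S - k)).map
            (fun j => PySem.Int.toStr (cpVals n.toNat S (k + j) + 1)) := by
  set N := n.toNat with hN
  set C := N / Nat.gcd N S with hC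
  have hN0 : 0 < N := by omega
  have hnN : (N : Int) = n := by omega
  have hC1 : 1 ≤ C := by
    rw [hC]
    exact (Nat.one_le_div_iff (Nat.gcd_pos_of_pos_left S hN0)).mpr (Nat.gcd_le_left S hN0)
  have hSN : S < N := by
    have := PySem.Int.mod_lt (m - 1) (b := n) (by omega)
    rw [hS] at this; omega
  intro fuel
  induction fuel with
  | zero => intro k path hk hf; omega
  | succ f ih =>
    intro k path hk hf
    rcases Nat.lt_or_ge k C with hkC | hkC
    · -- current not yet visited: one more iteration
      have hmem : cpVals N S k ∉ (List.range k).map (cpVals N S) := by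
        intro hmem
        obtain ⟨i, hi, hie⟩ := List.mem_map.mp hmem
        exact cpVals_distinct N S i k hN0 (List.mem_range.mp hi) hkC hie
      have hcont : PySem.Set.contains (PySem.Set.ofList ((List.range k).map (cpVals N S)))
          (cpVals N S k) = false := by
        simp [PySem.Set.contains, PySem.Set.mem_ofList, hmem]
      have hvk_lt : k * S % N < N := Nat.mod_lt _ hN0
      have hget : PySem.List.pyGet? (PySem.List.pyRange 1 (n + 1) 1) (cpVals N S k)
          = some (1 + cpVals N S k) := by
        unfold cpVals
        rw [PySem.List.pyGet?_natCast, PySem.List.getElem?_pyRange_one,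
          if_pos (by omega : k * S % N < (n + 1 - 1).toNat)]
      have hv : ∀ j : Nat, cpVals N S j = ((j : Int) * S) % n := by
        intro j; unfold cpVals; push_cast; rw [hnN]
      have hstep : PySem.Int.mod (cpVals N S k + m - 1) n = cpVals N S (k + 1) := by
        have hmod : (m - 1) % n = (S : Int) := by
          rw [← PySem.Int.mod_eq_emod_of_pos (by omega : (0:Int) < n), hS]
        rw [PySem.Int.mod_eq_emod_of_pos (by omega : (0:Int) < n), hv k, hv (k + 1)]
        rw [add_sub_assoc, Int.add_emod, Int.emod_emod_of_dvd _ dvd_rfl, hmod]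
        push_cast
        rw [show ((k : Int) + 1) * S = (k : Int) * S + S by ring]
        rw [Int.add_emod ((k : Int) * S) (S : Int)]
        rw [Int.emod_eq_of_lt (by positivity) (by omega : (S : Int) < n)]
      rw [cpLoopA, hcont]
      simp only [Bool.false_eq_true, if_false, hget, hstep]
      rw [show PySem.Set.add (PySem.Set.ofList ((List.range k).map (cpVals N S))) (cpVals N S k)
          = PySem.Set.ofList ((List.range (k+1)).map (cpVals N S)) by
        rw [List.range_succ, List.map_append, PySem.Set.ofList_eq_foldl,
          PySem.Set.ofList_eq_foldl, List.foldl_append]; rfl]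
      rw [ih (k + 1) (path ++ [PySem.Int.toStr (1 + cpVals N S k)]) (by omega) (by omega)]
      rw [List.append_assoc]
      congr 1
      rw [show C - k = (C - (k+1)) + 1 by omega, List.range_succ_eq_map]
      simp only [List.map_cons, List.map_map, List.cons_append, Function.comp_def]
      congr 1
      · rw [add_comm (1 : Int), Nat.add_zero]
      · apply List.map_congr_left; intro a _
        rw [show k + 1 + a = k + (a + 1) from by omega]
    · -- k = C : current = 0 was visited at step 0, loop stops
      have hkC' : k = C := by omega
      subst hkC'
      have h0 : cpVals N S C = 0 := cpVals_period N S hN0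
      have hmem : cpVals N S C ∈ (List.range C).map (cpVals N S) := by
        rw [h0]
        exact List.mem_map.mpr ⟨0, List.mem_range.mpr (by omega), cpVals_zero N S⟩
      have hcont : PySem.Set.contains (PySem.Set.ofList ((List.range C).map (cpVals N S)))
          (cpVals N S C) = true := by
        simp [PySem.Set.contains, PySem.Set.mem_ofList, hmem]
      rw [cpLoopA, hcont]
      simp

-- assembling both sides
theorem circular_path_eq_alt (n m : Int) (hn : 1 ≤ n) :
    circular_path n m = circular_path_alt n m := by
  set N := n.toNat with hNdef
  have hnN : (N : Int) = n := by omega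
  have hs0 : 0 ≤ PySem.Int.mod (m - 1) n := PySem.Int.mod_nonneg (m - 1) (by omega)
  set S := (PySem.Int.mod (m - 1) n).toNat with hSdef
  have hS : PySem.Int.mod (m - 1) n = (S : Int) := by omega
  set C := N / Nat.gcd N S with hCdef
  have hCN : C ≤ N := Nat.div_le_self N _
  have L := cpLoop_inv n m hn S hS (N + 1) 0 [] (Nat.zero_le _)
    (by rw [hNdef]; have := Nat.div_le_self n.toNat (Nat.gcd n.toNat S); omega)
  rw [cpVals_zero] at L
  simp only [List.range_zero, List.map_nil, Nat.sub_zero, List.nil_append] at L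
  have hg : pyGcdLoop n (PySem.Int.mod (m - 1) n) = ((Nat.gcd N S : Nat) : Int) := by
    rw [hS, ← hnN]
    unfold pyGcdLoop
    rw [show ((S : Int)).natAbs = S from Int.natAbs_natCast S]
    rw [gcd_loop_eq (S + 1) N S (by omega), Nat.gcd_comm]
  have hcount : PySem.Int.floordiv n (pyGcdLoop n (PySem.Int.mod (m - 1) n)) = ((C : Nat) : Int) := by
    rw [hg, ← hnN, PySem.Int.floordiv_natCast]
  unfold circular_path circular_path_alt
  simp only
  rw [show (PySem.Set.empty : PySem.Set Int) = PySem.Set.ofList [] from rfl, ← hNdef, L,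
    hcount, PySem.List.pyRange_one 0 (C : Int)]
  congr 1
  rw [List.map_map]
  apply List.map_congr_left
  intro j hj
  simp only [Function.comp_def, zero_add]
  congr 1
  rw [hS, show ((j : Int)) * (S : Int) = (((j * S : Nat) : Nat) : Int) by push_cast; ring,
    ← hnN, PySem.Int.mod_natCast]
  rfl

-- ===== VERDICT (by name: the statement is the Claim_ definition above) =====
theorem circular_path_spec : Claim_equal_circular_path := by
  intro n m _ hn
  unfold Spec_circular_path
  exact circular_path_eq_alt n m hn
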